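-- pv_equiv track=rewrite | github.com/PULSAR2105/Zebra | compiler/parser.py | search_min_priority
-- ===== SOURCE A (Python) =====
-- def determine_lower_para_influences(tokens):
--     parentheses_influence = 0
--     influences = []
--
--     for t in tokens:
--         if t == "(":
--             parentheses_influence += 1
--             influences.append(parentheses_influence)
--         elif t == ")":
--             influences.append(parentheses_influence)
--             parentheses_influence -= 1
--         else:
--             influences.append(parentheses_influence)
--
--     # si le niveau d'influence des parenthèses est supérieur à 0
--     # on soustrait 1, n fois
--     if min(influences) > 0:
--         for i in range(min(influences)):
--             tokens = tokens[1:-1]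
--             for iflu in range(len(influences)):
--                 influences[iflu] = influences[iflu] - 1
--
--         return tokens, min(influences), influences
--
--     return tokens, min(influences), influences
--
-- def search_min_priority(tokens, operators, operators_priority):
--     tokens, min_para_influence, influences = determine_lower_para_influences(tokens)
--
--     # we check if there are any operators left
--     good = False
--     for token in tokens:
--         if token in operators:
--             good = True
--     if not good:
--         return None, -1
--
--     # the lowest priority operator is sought
--     for operators in operators_priority:
--         for i in range(len(tokens)):
--             for operator in operators:
--                 if tokens[len(tokens) - 1 - i] in operators:
--                     if tokens[len(tokens) - 1 - i] == operator and influences[len(tokens) - 1 - i] == min_para_influence: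
--                         return operator, len(tokens) - 1 - i
-- ===== SOURCE B (Python) =====
-- def search_min_priority(tokens, operators, operators_priority):
--     # one influence pass, direct slice instead of repeated [1:-1], and a single
--     # right-to-left scan with a precomputed operator->priority-level dict
--     influences = []
--     depth = 0
--     for t in tokens:
--         if t == "(":
--             depth += 1
--             influences.append(depth)
--         elif t == ")":
--             influences.append(depth)
--             depth -= 1
--         else:
--             influences.append(depth)
--
--     m0 = min(influences)                      # raises on empty input, as the original does
--     m = m0 if m0 > 0 else 0
--     n = len(tokens)
--     toks = tokens[m:n - m] if n >= 2 * m else []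
--
--     opset = set(operators)
--     if not any(t in opset for t in toks):
--         return None, -1
--
--     prio = {}
--     for lvl, level in enumerate(operators_priority):
--         for op in level:
--             if op not in prio:
--                 prio[op] = lvl
--
--     best = None                               # (level, operator, index)
--     for j in range(len(toks) - 1, -1, -1):
--         if influences[j] != m0:
--             continue
--         lvl = prio.get(toks[j])
--         if lvl is None:
--             continue
--         if best is None or lvl < best[0]:
--             best = (lvl, toks[j], j)
--
--     if best is None:
--         return None
--     return best[1], best[2]
-- ===== Notes on version B (the rewrite author's own statement) =====
-- stated objective: faster
-- what changed: B replaces A's repeated [1:-1] stripping by one direct slice and A's per-priority-level rescans of the token list (for each level, for each position, for each operator) by a precomputed operator-to-level dict plus a single right-to-left pass tracking the best (lowest-level, rightmost) candidate.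
-- outside the precondition, e.g. on search_min_priority([], ['+'], [['+']]): A raises ValueError, B raises ValueError
import Mathlib
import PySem

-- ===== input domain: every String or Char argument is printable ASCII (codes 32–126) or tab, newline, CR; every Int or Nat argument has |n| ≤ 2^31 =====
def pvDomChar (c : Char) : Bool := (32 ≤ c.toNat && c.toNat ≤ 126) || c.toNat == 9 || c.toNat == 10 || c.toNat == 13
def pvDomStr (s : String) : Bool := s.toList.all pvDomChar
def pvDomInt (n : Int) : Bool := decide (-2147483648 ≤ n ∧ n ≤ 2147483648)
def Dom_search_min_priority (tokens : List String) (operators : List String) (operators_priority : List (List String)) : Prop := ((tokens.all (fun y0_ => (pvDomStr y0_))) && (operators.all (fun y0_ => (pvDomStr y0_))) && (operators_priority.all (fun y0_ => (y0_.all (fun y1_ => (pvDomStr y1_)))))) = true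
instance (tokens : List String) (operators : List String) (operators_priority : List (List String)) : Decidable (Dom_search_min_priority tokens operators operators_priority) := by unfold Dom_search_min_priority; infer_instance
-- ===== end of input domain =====

-- B replaces A's level-by-level rescans of the token list by one right-to-left pass over a
-- precomputed operator→priority dict, and the repeated [1:-1] stripping by one direct slice.

-- ===== PORT A =====
def pvInflLoopA (tokens : List String) : Int × List Int :=
  tokens.foldl (fun st t =>
    if t = "(" then (st.1 + 1, st.2 ++ [st.1 + 1])
    else if t = ")" then (st.1 - 1, st.2 ++ [st.1])
    else (st.1, st.2 ++ [st.1])) (0, [])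

def determine_lower_para_influences (tokens : List String) :
    Option (List String × Int × List Int) :=
  let influences := (pvInflLoopA tokens).2
  match PySem.List.min? influences (fun x => x) with
  | none => none   -- min([]) raises ValueError: excluded by Pre_
  | some m =>
    if 0 < m then
      let st := (PySem.List.pyRange 0 m 1).foldl
        (fun (st : List String × List Int) _ =>
          (PySem.List.slice st.1 (some 1) (some (-1)), st.2.map (fun v => v - 1)))
        (tokens, influences)
      match PySem.List.min? st.2 (fun x => x) with
      | none => none   -- unreachable: st.2 has tokens.length ≠ 0 elements
      | some m2 => some (st.1, m2, st.2)
    else some (tokens, m, influences)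

def pvForOperatorA (ops level : List String) (tok : String) (iv minp : Int) (j : Int) :
    Option (Option String × Int) :=
  match ops with
  | [] => none
  | op :: rest =>
    if tok ∈ level then
      if tok = op ∧ iv = minp then some (some op, j)
      else pvForOperatorA rest level tok iv minp j
    else pvForOperatorA rest level tok iv minp j

def pvForIA (is : List Int) (level toks : List String) (infl : List Int) (minp : Int) :
    Option (Option String × Int) :=
  match is with
  | [] => none
  | i :: rest =>
    let j : Int := (toks.length : Int) - 1 - i
    match PySem.List.pyGet? toks j, PySem.List.pyGet? infl j with
    | some tok, some iv =>
      (match pvForOperatorA level level tok iv minp j with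
       | some r => some r
       | none => pvForIA rest level toks infl minp)
    | _, _ => none   -- IndexError: unreachable for the ranges A uses

def pvForLevelsA (levels : List (List String)) (toks : List String) (infl : List Int)
    (minp : Int) : Option (Option String × Int) :=
  match levels with
  | [] => none
  | level :: rest =>
    match pvForIA (PySem.List.pyRange 0 (toks.length : Int) 1) level toks infl minp with
    | some r => some r
    | none => pvForLevelsA rest toks infl minp

def search_min_priority (tokens : List String) (operators : List String)
    (operators_priority : List (List String)) : Option (Option String × Int) :=
  match determine_lower_para_influences tokens with
  | none => none
  | some (toks, minp, infl) =>
    let good := toks.foldl (fun g t => if t ∈ operators then true else g) false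
    if good = false then some (none, -1)
    else pvForLevelsA operators_priority toks infl minp

-- ===== PORT B =====
def pvInflB (tokens : List String) (depth : Int) : List Int :=
  match tokens with
  | [] => []
  | t :: rest =>
    if t = "(" then (depth + 1) :: pvInflB rest (depth + 1)
    else if t = ")" then depth :: pvInflB rest (depth - 1)
    else depth :: pvInflB rest depth

def pvPrioB (operators_priority : List (List String)) : PySem.Dict String Int :=
  (PySem.List.enumerate operators_priority 0).foldl
    (fun d p => p.2.foldl (fun d op => if d.contains op then d else d.insert op p.1) d)
    PySem.Dict.empty

def pvBestB (toks : List String) (infl : List Int) (m0 : Int) (prio : PySem.Dict String Int) :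
    Option (Int × String × Int) :=
  (PySem.List.pyRange ((toks.length : Int) - 1) (-1) (-1)).foldl
    (fun best j =>
      if PySem.List.pyGetD infl j 0 ≠ m0 then best
      else
        match prio.get? (PySem.List.pyGetD toks j "") with
        | none => best
        | some lvl =>
          match best with
          | none => some (lvl, PySem.List.pyGetD toks j "", j)
          | some b => if lvl < b.1 then some (lvl, PySem.List.pyGetD toks j "", j) else best)
    none

def search_min_priority_alt (tokens : List String) (operators : List String)
    (operators_priority : List (List String)) : Option (Option String × Int) :=
  let influences := pvInflB tokens 0
  match PySem.List.min? influences (fun x => x) with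
  | none => none   -- min([]) raises ValueError: excluded by Pre_
  | some m0 =>
    let m : Int := if 0 < m0 then m0 else 0
    let n : Int := (tokens.length : Int)
    let toks := if 2 * m ≤ n then PySem.List.slice tokens (some m) (some (n - m)) else []
    let opset := PySem.Set.ofList operators
    if (toks.any (fun t => opset.contains t)) = false then some (none, -1)
    else
      let prio := pvPrioB operators_priority
      match pvBestB toks influences m0 prio with
      | none => none
      | some b => some (some b.2.1, b.2.2)

-- ===== PRECONDITION & SPEC =====
-- Pre_ excludes only the empty token list, on which A raises ValueError (min of empty sequence).
def Pre_search_min_priority (tokens : List String) (operators : List String)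
    (operators_priority : List (List String)) : Prop := tokens ≠ []
instance (tokens : List String) (operators : List String) (operators_priority : List (List String)) : Decidable (Pre_search_min_priority tokens operators operators_priority) := by unfold Pre_search_min_priority; infer_instance

def pvWitness_search_min_priority : List String × List String × List (List String) :=
  (["(", "a", "+", "b", ")", "*", "c"], ["+", "*"], [["+", "-"], ["*", "/"]])

def Spec_search_min_priority (tokens : List String) (operators : List String) (operators_priority : List (List String)) (out : Option (Option String × Int)) : Prop := out = search_min_priority_alt tokens operators operators_priority
instance (tokens : List String) (operators : List String) (operators_priority : List (List String)) (out : Option (Option String × Int)) : Decidable (Spec_search_min_priority tokens operators operators_priority out) := by unfold Spec_search_min_priority; infer_instance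

-- ===== CLAIM (what is proved, stated in full; the proofs are below) =====
def Claim_equal_search_min_priority : Prop := ∀ (tokens : List String) (operators : List String) (operators_priority : List (List String)), Dom_search_min_priority tokens operators operators_priority → Pre_search_min_priority tokens operators operators_priority → Spec_search_min_priority tokens operators operators_priority (search_min_priority tokens operators operators_priority)

-- ===== LEMMAS AND PROOFS =====

-- == spec-side vocabulary ==

/-- Indices n'-1, n'-2, …, 0 (the right-to-left traversal both loops make). -/
def pvDescend : Nat → List Nat
  | 0 => []
  | k + 1 => k :: pvDescend k

/-- Index of the first priority level containing `t`. -/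
def pvFirstLvl (levels : List (List String)) (t : String) : Option Nat :=
  match levels with
  | [] => none
  | L :: ls => if t ∈ L then some 0 else (pvFirstLvl ls t).map (· + 1)

/-- A's inner two loops for one level, over an abstract index list. -/
def pvFindLvl (level : List String) (cond : Nat → Bool) (toks : List String) :
    List Nat → Option (Option String × Int)
  | [] => none
  | j :: rest =>
    if toks.getD j "" ∈ level ∧ cond j then some (some (toks.getD j ""), (j : Int))
    else pvFindLvl level cond toks rest

/-- A's outer loop over priority levels. -/
def pvSearchLs (ls : List (List String)) (cond : Nat → Bool) (toks : List String)
    (js : List Nat) : Option (Option String × Int) :=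
  match ls with
  | [] => none
  | L :: rest =>
    match pvFindLvl L cond toks js with
    | some r => some r
    | none => pvSearchLs rest cond toks js

/-- B's min-tracking pass, over an abstract index list, with Nat data. -/
def pvBestF (levels : List (List String)) (cond : Nat → Bool) (toks : List String) :
    List Nat → Option (Nat × String × Nat) → Option (Nat × String × Nat)
  | [], acc => acc
  | j :: rest, acc =>
    pvBestF levels cond toks rest
      (if cond j then
        match pvFirstLvl levels (toks.getD j "") with
        | none => acc
        | some l =>
          match acc with
          | none => some (l, toks.getD j "", j)
          | some b => if l < b.1 then some (l, toks.getD j "", j) else acc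
       else acc)

def pvMapped (o : Option (Nat × String × Nat)) : Option (Option String × Int) :=
  o.map (fun b => (some b.2.1, (b.2.2 : Int)))

def pvArmA (levels : List (List String)) (cond : Nat → Bool) (toks : List String)
    (acc : Option (Nat × String × Nat)) (js : List Nat) : Option (Option String × Int) :=
  match acc with
  | none => pvSearchLs levels cond toks js
  | some (l, t, j) =>
    some ((pvSearchLs (levels.take l) cond toks js).getD (some t, (j : Int)))

-- == basic facts ==

theorem pvInflB_length (tokens : List String) (d : Int) :
    (pvInflB tokens d).length = tokens.length := by
  induction tokens generalizing d with
  | nil => simp [pvInflB]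
  | cons t rest ih => simp [pvInflB]; split_ifs <;> simp [ih]

theorem pvInflLoopA_snd (tokens : List String) : ∀ (p : Int) (acc : List Int),
    (tokens.foldl (fun st t =>
      if t = "(" then (st.1 + 1, st.2 ++ [st.1 + 1])
      else if t = ")" then (st.1 - 1, st.2 ++ [st.1])
      else (st.1, st.2 ++ [st.1])) (p, acc)).2 = acc ++ pvInflB tokens p := by
  induction tokens with
  | nil => intro p acc; simp [pvInflB]
  | cons t rest ih =>
    intro p acc
    by_cases h1 : t = "("
    · simp [List.foldl_cons, h1, pvInflB, ih]
    · by_cases h2 : t = ")"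
      · simp [List.foldl_cons, h1, h2, pvInflB, ih]
      · simp [List.foldl_cons, h1, h2, pvInflB, ih]

theorem pvInflA_eq (tokens : List String) : (pvInflLoopA tokens).2 = pvInflB tokens 0 := by
  simpa using pvInflLoopA_snd tokens 0 []


theorem pvSlice1neg1 (xs : List String) :
    PySem.List.slice xs (some 1) (some (-1)) = (xs.drop 1).take (xs.length - 2) := by
  rcases eq_or_ne xs [] with h | h
  · subst h; simp [PySem.List.slice]
  · have hn : 1 ≤ xs.length := List.length_pos_iff.mpr h
    simp only [PySem.List.slice, PySem.List.clampIdx]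
    norm_num
    rw [if_neg h, min_eq_left hn, List.drop_one]
    congr 1
    omega

theorem pvFoldlIgnore {α β : Type} (l : List β) (g : α → α) (init : α) :
    l.foldl (fun st _ => g st) init = g^[l.length] init := by
  induction l generalizing init with
  | nil => rfl
  | cons x rest ih => simp [List.foldl_cons, ih, Function.iterate_succ_apply]

theorem pvIterProd {α β : Type} (g1 : α → α) (g2 : β → β) (k : Nat) (a : α) (b : β) :
    (fun st : α × β => (g1 st.1, g2 st.2))^[k] (a, b) = (g1^[k] a, g2^[k] b) := by
  induction k generalizing a b with
  | zero => rfl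
  | succ k ih => simp [Function.iterate_succ_apply, ih]

theorem pvIterTrim (k : Nat) (xs : List String) :
    (fun l : List String => PySem.List.slice l (some 1) (some (-1)))^[k] xs
      = (xs.drop k).take (xs.length - 2 * k) := by
  induction k generalizing xs with
  | zero => simp
  | succ k ih =>
    rw [Function.iterate_succ_apply', ih, pvSlice1neg1]
    rw [List.drop_take, List.take_take, List.length_take, List.length_drop, List.drop_drop]
    congr 1
    omega

theorem pvIterMapSub (k : Nat) (xs : List Int) :
    (fun l : List Int => l.map (fun v => v - 1))^[k] xs = xs.map (fun v => v - (k : Int)) := by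
  induction k generalizing xs with
  | zero => simp
  | succ k ih =>
    rw [Function.iterate_succ_apply', ih, List.map_map]
    refine List.map_congr_left (fun v _ => ?_)
    simp only [Function.comp_apply]
    omega

theorem pvFoldlMinSub (c : Int) (t : List Int) : ∀ x : Int,
    (t.map (fun v => v - c)).foldl min (x - c) = t.foldl min x - c := by
  induction t with
  | nil => intro x; rfl

  | cons y rest ih =>
    intro x
    simp only [List.map_cons, List.foldl_cons]
    rw [min_sub_sub_right, ih]

theorem pvMinMapSub (c : Int) (xs : List Int) :
    PySem.List.min? (xs.map (fun v => v - c)) (fun x => x)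
      = (PySem.List.min? xs (fun x => x)).map (fun v => v - c) := by
  cases xs with
  | nil => rfl
  | cons x t =>
    rw [List.map_cons, PySem.List.min?_id_cons, PySem.List.min?_id_cons]
    simp [pvFoldlMinSub]

/-- The uniform description of what `determine_lower_para_influences` returns. -/
theorem pvDetermine_eq (tokens : List String) (m0 : Int)
    (hm : PySem.List.min? (pvInflB tokens 0) (fun x => x) = some m0) :
    determine_lower_para_influences tokens =
      some ((tokens.drop (if 0 < m0 then m0 else 0).toNat).take
              (tokens.length - 2 * (if 0 < m0 then m0 else 0).toNat),
            m0 - (if 0 < m0 then m0 else 0),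
            (pvInflB tokens 0).map (fun v => v - (if 0 < m0 then m0 else 0))) := by
  have hinfl := pvInflA_eq tokens
  simp only [determine_lower_para_influences, hinfl, hm]
  by_cases h0 : 0 < m0
  · simp only [h0, if_pos]
    have hfold : (PySem.List.pyRange 0 m0 1).foldl
        (fun (st : List String × List Int) _ =>
          (PySem.List.slice st.1 (some 1) (some (-1)), st.2.map (fun v => v - 1)))
        (tokens, pvInflB tokens 0)
        = ((tokens.drop m0.toNat).take (tokens.length - 2 * m0.toNat),
           (pvInflB tokens 0).map (fun v => v - m0)) := by
      rw [pvFoldlIgnore _ (fun st : List String × List Int =>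
            (PySem.List.slice st.1 (some 1) (some (-1)), st.2.map (fun v => v - 1)))]
      rw [PySem.List.length_pyRange_one]
      have h00 : (m0 - 0).toNat = m0.toNat := by omega
      rw [h00]
      rw [pvIterProd (fun l : List String => PySem.List.slice l (some 1) (some (-1)))
            (fun l : List Int => l.map (fun v => v - 1))]
      rw [pvIterTrim, pvIterMapSub]
      have hc : ((m0.toNat : Int)) = m0 := by omega
      rw [hc]
    rw [hfold]
    simp only []
    rw [pvMinMapSub, hm]
    rfl
  · simp only [h0, if_false]
    simp


-- == option-or and small laws ==

def pvOr {a : Type} (x y : Option a) : Option a :=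
  match x with
  | some v => some v
  | none => y

theorem pvOr_assoc {a : Type} (x y z : Option a) : pvOr (pvOr x y) z = pvOr x (pvOr y z) := by
  cases x <;> rfl

theorem pvOr_some {a : Type} (x : Option a) (v : a) : pvOr x (some v) = some (x.getD v) := by
  cases x <;> rfl

theorem pvOr_none {a : Type} (x : Option a) : pvOr x none = x := by cases x <;> rfl

-- == A's operator loop ==

theorem pvForOperatorA_eq (ops level : List String) (tok : String) (iv minp : Int) (j : Int) :
    pvForOperatorA ops level tok iv minp j =
      if tok ∈ level ∧ iv = minp ∧ tok ∈ ops then some (some tok, j) else none := by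
  induction ops with
  | nil => simp [pvForOperatorA]
  | cons op rest ih =>
    rw [pvForOperatorA]
    by_cases h1 : tok ∈ level
    · rw [if_pos h1]
      by_cases h2 : tok = op ∧ iv = minp
      · obtain ⟨h2a, h2b⟩ := h2
        subst h2a
        simp [h2b, h1]
      · rw [if_neg h2, ih]
        by_cases h3 : iv = minp
        · have h4 : tok ≠ op := fun he => h2 ⟨he, h3⟩
          simp [h1, h3, h4]
        · simp [h3]
    · rw [if_neg h1, ih]
      simp [h1]

-- == findLvl / searchLs laws ==

theorem pvSearchLs_cons (L : List String) (ls : List (List String)) (cond : Nat → Bool)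
    (toks : List String) (js : List Nat) :
    pvSearchLs (L :: ls) cond toks js
      = pvOr (pvFindLvl L cond toks js) (pvSearchLs ls cond toks js) := by
  rw [pvSearchLs]
  cases pvFindLvl L cond toks js <;> rfl

theorem pvSearchLs_append (xs ys : List (List String)) (cond : Nat → Bool)
    (toks : List String) (js : List Nat) :
    pvSearchLs (xs ++ ys) cond toks js
      = pvOr (pvSearchLs xs cond toks js) (pvSearchLs ys cond toks js) := by
  induction xs with
  | nil => rfl
  | cons L rest ih =>
    rw [List.cons_append, pvSearchLs_cons, pvSearchLs_cons, ih, pvOr_assoc]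

theorem pvFindLvl_nil_js (L : List String) (cond : Nat → Bool) (toks : List String) :
    pvFindLvl L cond toks [] = none := rfl

theorem pvSearchLs_nil_js (ls : List (List String)) (cond : Nat → Bool) (toks : List String) :
    pvSearchLs ls cond toks [] = none := by
  induction ls with
  | nil => rfl
  | cons L rest ih => rw [pvSearchLs_cons, ih, pvOr_none, pvFindLvl_nil_js]

theorem pvFindLvl_skip (L : List String) (cond : Nat → Bool) (toks : List String)
    (j : Nat) (js : List Nat) (h : ¬(toks.getD j "" ∈ L ∧ cond j)) :
    pvFindLvl L cond toks (j :: js) = pvFindLvl L cond toks js := by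
  rw [pvFindLvl, if_neg h]

theorem pvFindLvl_hit (L : List String) (cond : Nat → Bool) (toks : List String)
    (j : Nat) (js : List Nat) (h : toks.getD j "" ∈ L ∧ cond j) :
    pvFindLvl L cond toks (j :: js) = some (some (toks.getD j ""), (j : Int)) := by
  rw [pvFindLvl, if_pos h]

theorem pvSearchLs_skip (ls : List (List String)) (cond : Nat → Bool) (toks : List String)
    (j : Nat) (js : List Nat) (h : ∀ L ∈ ls, toks.getD j "" ∉ L) :
    pvSearchLs ls cond toks (j :: js) = pvSearchLs ls cond toks js := by
  induction ls with
  | nil => rfl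
  | cons L rest ih =>
    rw [pvSearchLs_cons, pvSearchLs_cons, ih (fun M hM => h M (List.mem_cons_of_mem _ hM)),
      pvFindLvl_skip]
    exact fun hc => h L (List.mem_cons_self) hc.1

theorem pvSearchLs_skip_cond (ls : List (List String)) (cond : Nat → Bool) (toks : List String)
    (j : Nat) (js : List Nat) (h : cond j = false) :
    pvSearchLs ls cond toks (j :: js) = pvSearchLs ls cond toks js := by
  induction ls with
  | nil => rfl
  | cons L rest ih =>
    rw [pvSearchLs_cons, pvSearchLs_cons, ih, pvFindLvl_skip]
    simp [h]

theorem pvFindLvl_congr (L : List String) (cond cond' : Nat → Bool) (toks : List String)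
    (js : List Nat) (h : ∀ j ∈ js, cond j = cond' j) :
    pvFindLvl L cond toks js = pvFindLvl L cond' toks js := by
  induction js with
  | nil => rfl
  | cons j rest ih =>
    rw [pvFindLvl, pvFindLvl, h j (List.mem_cons_self)]
    rw [ih (fun i hi => h i (List.mem_cons_of_mem _ hi))]

theorem pvSearchLs_congr (ls : List (List String)) (cond cond' : Nat → Bool)
    (toks : List String) (js : List Nat) (h : ∀ j ∈ js, cond j = cond' j) :
    pvSearchLs ls cond toks js = pvSearchLs ls cond' toks js := by
  induction ls with
  | nil => rfl
  | cons L rest ih => rw [pvSearchLs_cons, pvSearchLs_cons, ih, pvFindLvl_congr _ _ _ _ _ h]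

-- == descend / firstLvl facts ==

theorem pvDescend_lt : ∀ (k j : Nat), j ∈ pvDescend k → j < k := by
  intro k
  induction k with
  | zero => intro j h; simp [pvDescend] at h
  | succ k ih =>
    intro j h
    rw [pvDescend] at h
    rcases List.mem_cons.mp h with h | h
    · omega
    · exact Nat.lt_succ_of_lt (ih j h)

theorem pvFirstLvl_none (levels : List (List String)) (tok : String)
    (h : pvFirstLvl levels tok = none) : ∀ L ∈ levels, tok ∉ L := by
  induction levels with
  | nil => simp
  | cons L ls ih =>
    rw [pvFirstLvl] at h
    intro M hM
    by_cases hm : tok ∈ L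
    · rw [if_pos hm] at h; exact absurd h (by simp)
    · rw [if_neg hm] at h
      rcases List.mem_cons.mp hM with rfl | hM'
      · exact hm
      · exact ih (by simpa using h) M hM'

theorem pvFirstLvl_some (levels : List (List String)) (tok : String) (l : Nat)
    (h : pvFirstLvl levels tok = some l) :
    l < levels.length ∧ (∀ L ∈ levels.take l, tok ∉ L) ∧ tok ∈ levels.getD l [] := by
  induction levels generalizing l with
  | nil => simp [pvFirstLvl] at h
  | cons L ls ih =>
    rw [pvFirstLvl] at h
    by_cases hm : tok ∈ L
    · rw [if_pos hm] at h
      obtain rfl : l = 0 := by simpa using h.symm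
      exact ⟨by simp, by simp, hm⟩
    · rw [if_neg hm] at h
      obtain ⟨l', hl', rfl⟩ := Option.map_eq_some_iff.mp h
      obtain ⟨h1, h2, h3⟩ := ih l' hl'
      refine ⟨by simpa using h1, ?_, by simpa using h3⟩
      intro M hM
      rw [List.take_succ_cons] at hM
      rcases List.mem_cons.mp hM with rfl | hM'
      · exact hm
      · exact h2 M hM'


-- == A's index loop over range(len(tokens)) is findLvl over descend ==

theorem pvForIA_eq (level toks : List String) (infl : List Int) (minp : Int)
    (hlen : toks.length ≤ infl.length) :
    ∀ k : Nat, k ≤ toks.length →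
      pvForIA (PySem.List.pyRange ((toks.length : Int) - (k : Int)) (toks.length : Int) 1)
          level toks infl minp
        = pvFindLvl level (fun j => decide (infl.getD j 0 = minp)) toks (pvDescend k) := by
  intro k
  induction k with
  | zero =>
    intro _
    rw [PySem.List.pyRange_one_eq_nil (by omega)]
    rfl
  | succ k ih =>
    intro hk
    have ha : (toks.length : Int) - ((k : Int) + 1) < (toks.length : Int) := by omega
    have hcast : ((k + 1 : Nat) : Int) = (k : Int) + 1 := by push_cast; ring
    rw [hcast, PySem.List.pyRange_one_cons ha]
    rw [pvForIA]
    have hj : (toks.length : Int) - 1 - ((toks.length : Int) - ((k : Int) + 1)) = ((k : Nat) : Int) := by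
      omega
    rw [hj]
    have hk1 : k < toks.length := by omega
    have hk2 : k < infl.length := by omega
    rw [PySem.List.pyGet?_natCast, PySem.List.pyGet?_natCast]
    rw [List.getElem?_eq_getElem hk1, List.getElem?_eq_getElem hk2]
    simp only []
    rw [pvForOperatorA_eq]
    rw [pvDescend, pvFindLvl]
    have hgt : toks.getD k "" = toks[k] := List.getD_eq_getElem toks "" hk1
    have hgi : infl.getD k 0 = infl[k] := List.getD_eq_getElem infl 0 hk2
    by_cases hc : toks[k] ∈ level ∧ infl[k] = minp
    · rw [if_pos ⟨hc.1, hc.2, hc.1⟩, if_pos (by rw [hgt, hgi]; exact ⟨hc.1, by simp [hc.2]⟩)]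
      rw [hgt]
    · rw [if_neg (fun h => hc ⟨h.1, h.2.1⟩),
        if_neg (by rw [hgt, hgi]; intro h; exact hc ⟨h.1, by simpa using h.2⟩)]
      have hnext : (toks.length : Int) - ((k : Int) + 1) + 1 = (toks.length : Int) - (k : Int) := by
        omega
      rw [hnext]
      exact ih (by omega)

theorem pvForLevelsA_eq (levels : List (List String)) (toks : List String) (infl : List Int)
    (minp : Int) (hlen : toks.length ≤ infl.length) :
    pvForLevelsA levels toks infl minp
      = pvSearchLs levels (fun j => decide (infl.getD j 0 = minp)) toks
          (pvDescend toks.length) := by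
  induction levels with
  | nil => rfl
  | cons L rest ih =>
    rw [pvForLevelsA, pvSearchLs]
    have h0 : PySem.List.pyRange 0 (toks.length : Int) 1
        = PySem.List.pyRange ((toks.length : Int) - ((toks.length : Nat) : Int))
            (toks.length : Int) 1 := by norm_num
    rw [h0, pvForIA_eq L toks infl minp hlen toks.length (le_refl _)]
    cases pvFindLvl L (fun j => decide (infl.getD j 0 = minp)) toks (pvDescend toks.length) with
    | none => simpa using ih
    | some r => rfl


-- == B's countdown range is descend ==

theorem pvRangeNegDescend : ∀ k : Nat,
    PySem.List.pyRange ((k : Int) - 1) (-1) (-1) = (pvDescend k).map (fun j : Nat => (j : Int)) := by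
  intro k
  induction k with
  | zero => rw [PySem.List.pyRange_neg_one_eq_nil (by omega)]; rfl
  | succ k ih =>
    have h1 : ((k + 1 : Nat) : Int) - 1 = (k : Int) := by push_cast; ring
    rw [h1, PySem.List.pyRange_neg_one_cons (by omega)]
    rw [pvDescend, List.map_cons, ← ih]

-- == B's priority dict computes pvFirstLvl ==

theorem pvPrio_inner (L : List String) (lvl : Int) : ∀ (d : PySem.Dict String Int) (tok : String),
    (L.foldl (fun d op => if d.contains op then d else d.insert op lvl) d).get? tok
      = pvOr (d.get? tok) (if tok ∈ L then some lvl else none) := by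
  induction L with
  | nil => intro d tok; simp [pvOr_none]
  | cons op rest ih =>
    intro d tok
    rw [List.foldl_cons]
    by_cases hc : d.contains op
    · rw [if_pos hc, ih]
      by_cases ht : tok = op
      · subst ht
        cases hg : d.get? tok with
        | none =>
          exfalso
          rw [PySem.Dict.contains_eq_isSome_get?, hg] at hc
          simp at hc
        | some v => simp [pvOr, hg]
      · simp [List.mem_cons, ht]
    · rw [if_neg hc, ih]
      by_cases ht : tok = op
      · subst ht
        have hg : d.get? tok = none := by
          rw [PySem.Dict.contains_eq_isSome_get?] at hc
          cases h : d.get? tok with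
          | none => rfl
          | some v => rw [h] at hc; simp at hc
        rw [PySem.Dict.get?_insert, if_pos rfl, hg]
        simp [pvOr]
      · rw [PySem.Dict.get?_insert, if_neg ht]
        simp [List.mem_cons, ht]

theorem pvPrio_outer : ∀ (ls : List (List String)) (s : Int) (d : PySem.Dict String Int)
    (tok : String),
    ((PySem.List.enumerate ls s).foldl
        (fun d p => p.2.foldl (fun d op => if d.contains op then d else d.insert op p.1) d)
        d).get? tok
      = pvOr (d.get? tok) ((pvFirstLvl ls tok).map (fun k => s + (k : Int))) := by
  intro ls
  induction ls with
  | nil => intro s d tok; simp [PySem.List.enumerate_nil, pvFirstLvl, pvOr_none]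
  | cons L rest ih =>
    intro s d tok
    rw [PySem.List.enumerate_cons, List.foldl_cons, ih, pvPrio_inner, pvOr_assoc, pvFirstLvl]
    congr 1
    by_cases hm : tok ∈ L
    · simp [hm, pvOr]
    · rw [if_neg hm]
      simp only [if_neg hm]
      cases pvFirstLvl rest tok with
      | none => rfl
      | some k =>
        simp [pvOr, Option.map_map]
        push_cast
        ring

theorem pvPrioB_get? (levels : List (List String)) (tok : String) :
    (pvPrioB levels).get? tok = (pvFirstLvl levels tok).map (fun k => (k : Int)) := by
  rw [pvPrioB, pvPrio_outer]
  simp [pvOr, PySem.Dict.get?_empty]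


-- == B's fold is pvBestF over descend ==

theorem pvBestB_gen (levels : List (List String)) (toks : List String) (infl : List Int)
    (m0 : Int) : ∀ (js : List Nat) (acc : Option (Nat × String × Nat)),
    ((js.map (fun j : Nat => (j : Int))).foldl
        (fun best j =>
          if PySem.List.pyGetD infl j 0 ≠ m0 then best
          else
            match (pvPrioB levels).get? (PySem.List.pyGetD toks j "") with
            | none => best
            | some lvl =>
              match best with
              | none => some (lvl, PySem.List.pyGetD toks j "", j)
              | some b => if lvl < b.1 then some (lvl, PySem.List.pyGetD toks j "", j) else best)
        (acc.map (fun b => ((b.1 : Int), b.2.1, (b.2.2 : Int)))))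
      = (pvBestF levels (fun j => decide (infl.getD j 0 = m0)) toks js acc).map
          (fun b => ((b.1 : Int), b.2.1, (b.2.2 : Int))) := by
  have hF : ∀ (acc : Option (Nat × String × Nat)) (j : Nat),
      ((fun (best : Option (Int × String × Int)) (jj : Int) =>
        if PySem.List.pyGetD infl jj 0 ≠ m0 then best
        else
          match (pvPrioB levels).get? (PySem.List.pyGetD toks jj "") with
          | none => best
          | some lvl =>
            match best with
            | none => some (lvl, PySem.List.pyGetD toks jj "", jj)
            | some b => if lvl < b.1 then some (lvl, PySem.List.pyGetD toks jj "", jj) else best)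
        (acc.map (fun b => ((b.1 : Int), b.2.1, (b.2.2 : Int)))) ((j : Nat) : Int))
      = ((if decide (infl.getD j 0 = m0) then
            match pvFirstLvl levels (toks.getD j "") with
            | none => acc
            | some l =>
              match acc with
              | none => some (l, toks.getD j "", j)
              | some b => if l < b.1 then some (l, toks.getD j "", j) else acc
          else acc).map (fun b => ((b.1 : Int), b.2.1, (b.2.2 : Int)))) := by
    intro acc j
    simp only [PySem.List.pyGetD_natCast, pvPrioB_get?, List.getD_eq_getElem?_getD]
    by_cases hc : infl[j]?.getD 0 = m0
    · rw [if_neg (not_ne_iff.mpr hc), if_pos (by simp [hc])]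
      cases hfl : pvFirstLvl levels (toks[j]?.getD "") with
      | none => simp
      | some l =>
        simp only [Option.map_some]
        cases acc with
        | none => simp
        | some b =>
          by_cases hlb : l < b.1
          · have h2 : (l : Int) < (b.1 : Int) := by exact_mod_cast hlb
            simp [h2, hlb]
          · have h2 : ¬ (l : Int) < (b.1 : Int) := by exact_mod_cast hlb
            simp [h2, hlb]
    · rw [if_pos hc, if_neg (by simp [hc])]
  intro js
  induction js with
  | nil => intro acc; rfl
  | cons j rest ih =>
    intro acc
    rw [List.map_cons, List.foldl_cons, pvBestF]
    have h2 := ih (if decide (infl.getD j 0 = m0) then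
            match pvFirstLvl levels (toks.getD j "") with
            | none => acc
            | some l =>
              match acc with
              | none => some (l, toks.getD j "", j)
              | some b => if l < b.1 then some (l, toks.getD j "", j) else acc
          else acc)
    rw [← hF acc j] at h2
    exact h2

theorem pvBestB_eq (levels : List (List String)) (toks : List String) (infl : List Int)
    (m0 : Int) :
    pvBestB toks infl m0 (pvPrioB levels)
      = (pvBestF levels (fun j => decide (infl.getD j 0 = m0)) toks
          (pvDescend toks.length) none).map
          (fun b => ((b.1 : Int), b.2.1, (b.2.2 : Int))) := by
  have hgen := pvBestB_gen levels toks infl m0 (pvDescend toks.length) none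
  rw [pvBestB, pvRangeNegDescend toks.length]
  simpa using hgen


-- == decomposing a take around one position ==

theorem pvTakeDecomp (ls : List (List String)) (l0 l : Nat) (h0 : l0 < ls.length)
    (hl : l0 < l) :
    ls.take l = ls.take l0 ++ ls.getD l0 [] :: (ls.drop (l0 + 1)).take (l - l0 - 1) := by
  have h1 : ls.take l = ls.take l0 ++ (ls.drop l0).take (l - l0) := by
    conv_lhs => rw [show l = l0 + (l - l0) from by omega]
    rw [List.take_add]
  rw [h1, List.drop_eq_getElem_cons h0, List.getD_eq_getElem ls [] h0]
  congr 1
  rw [show l - l0 = (l - l0 - 1) + 1 from by omega, List.take_succ_cons]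
  congr 2

theorem pvLevelsDecomp (ls : List (List String)) (l0 : Nat) (h0 : l0 < ls.length) :
    ls = ls.take l0 ++ ls.getD l0 [] :: ls.drop (l0 + 1) := by
  conv_lhs => rw [← List.take_append_drop l0 ls]
  rw [List.drop_eq_getElem_cons h0, List.getD_eq_getElem ls [] h0]

-- == the crux: B's min-tracking pass computes A's level-by-level search ==

theorem pvMain (levels : List (List String)) (cond : Nat → Bool) (toks : List String) :
    ∀ (js : List Nat) (acc : Option (Nat × String × Nat)),
    pvMapped (pvBestF levels cond toks js acc) = pvArmA levels cond toks acc js := by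
  intro js
  induction js with
  | nil =>
    intro acc
    cases acc with
    | none => simp [pvBestF, pvArmA, pvMapped, pvSearchLs_nil_js]
    | some b =>
      obtain ⟨l, t, j⟩ := b
      simp [pvBestF, pvArmA, pvMapped, pvSearchLs_nil_js]
  | cons j rest ih =>
    intro acc
    rw [pvBestF]
    by_cases hcj : cond j
    · rw [if_pos hcj]
      cases hfl : pvFirstLvl levels (toks.getD j "") with
      | none =>
        rw [ih]
        have hskip := pvFirstLvl_none levels _ hfl
        cases acc with
        | none =>
          simp only [pvArmA]
          rw [pvSearchLs_skip _ _ _ _ _ hskip]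
        | some b =>
          obtain ⟨l, t, j0⟩ := b
          simp only [pvArmA]
          rw [pvSearchLs_skip _ _ _ _ _ (fun L hL => hskip L (List.mem_of_mem_take hL))]
      | some l0 =>
        obtain ⟨hlen0, hnotin, hin⟩ := pvFirstLvl_some levels _ l0 hfl
        cases acc with
        | none =>
          rw [ih]
          simp only [pvArmA]
          conv_rhs => rw [pvLevelsDecomp levels l0 hlen0]
          rw [pvSearchLs_append, pvSearchLs_cons, pvFindLvl_hit _ _ _ _ _ ⟨hin, hcj⟩,
            pvSearchLs_skip _ _ _ _ _ hnotin]
          rw [show pvOr (some ((some (toks.getD j ""), (j : Int)) : Option String × Int))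
              (pvSearchLs (levels.drop (l0 + 1)) cond toks (j :: rest))
              = some (some (toks.getD j ""), (j : Int)) from rfl]
          rw [pvOr_some]
        | some b =>
          obtain ⟨l, t, j0⟩ := b
          dsimp only
          by_cases hlt : l0 < l
          · rw [if_pos hlt, ih]
            simp only [pvArmA]
            conv_rhs => rw [pvTakeDecomp levels l0 l hlen0 hlt]
            rw [pvSearchLs_append, pvSearchLs_cons, pvFindLvl_hit _ _ _ _ _ ⟨hin, hcj⟩,
              pvSearchLs_skip _ _ _ _ _ hnotin]
            rw [show pvOr (some ((some (toks.getD j ""), (j : Int)) : Option String × Int))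
                (pvSearchLs ((levels.drop (l0 + 1)).take (l - l0 - 1)) cond toks (j :: rest))
                = some (some (toks.getD j ""), (j : Int)) from rfl]
            rw [pvOr_some]
            rfl
          · rw [if_neg hlt, ih]
            simp only [pvArmA]
            have hsub : ∀ L ∈ levels.take l, toks.getD j "" ∉ L := by
              intro L hL
              have : L ∈ levels.take l0 := by
                rw [show levels.take l = (levels.take l0).take l from by
                  rw [List.take_take, Nat.min_eq_left (by omega)]] at hL
                exact List.mem_of_mem_take hL
              exact hnotin L this
            rw [pvSearchLs_skip _ _ _ _ _ hsub]
    · rw [if_neg hcj, ih]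
      cases acc with
      | none =>
        simp only [pvArmA]
        rw [pvSearchLs_skip_cond _ _ _ _ _ (by simpa using hcj)]
      | some b =>
        obtain ⟨l, t, j0⟩ := b
        simp only [pvArmA]
        rw [pvSearchLs_skip_cond _ _ _ _ _ (by simpa using hcj)]


-- == stripped-token and good-check bridges ==

theorem pvToksB_eq (tokens : List String) (m : Int) (hm : 0 ≤ m) :
    (if 2 * m ≤ (tokens.length : Int) then
        PySem.List.slice tokens (some m) (some ((tokens.length : Int) - m))
      else [])
      = (tokens.drop m.toNat).take (tokens.length - 2 * m.toNat) := by
  split_ifs with h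
  · rw [PySem.List.slice_toNat tokens hm (by omega)]
    congr 1
    omega
  · rw [show tokens.length - 2 * m.toNat = 0 from by omega]
    simp

theorem pvGoodFold (toks operators : List String) : ∀ g : Bool,
    toks.foldl (fun g t => if t ∈ operators then true else g) g
      = (g || toks.any (fun t => (PySem.Set.ofList operators).contains t)) := by
  induction toks with
  | nil => intro g; simp
  | cons t rest ih =>
    intro g
    rw [List.foldl_cons, List.any_cons, ih]
    by_cases h : t ∈ operators
    · simp [h, PySem.Set.mem_ofList]
    · simp [h, PySem.Set.mem_ofList]

theorem pvCondBridge (infl : List Int) (m m0 : Int) (bound : Nat) (hb : bound ≤ infl.length) :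
    ∀ j ∈ pvDescend bound,
      (fun j => decide ((infl.map (fun v => v - m)).getD j 0 = m0 - m)) j
        = (fun j => decide (infl.getD j 0 = m0)) j := by
  intro j hj
  have hjb : j < infl.length := lt_of_lt_of_le (pvDescend_lt bound j hj) hb
  have hjm : j < (infl.map (fun v => v - m)).length := by simpa using hjb
  simp only []
  rw [List.getD_eq_getElem _ 0 hjm, List.getElem_map, ← List.getD_eq_getElem infl 0 hjb]
  exact decide_eq_decide.mpr ⟨fun h => by omega, fun h => by omega⟩

-- ===== VERDICT (by name: the statement is the Claim_ definition above) =====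
theorem search_min_priority_spec : Claim_equal_search_min_priority := by
  unfold Claim_equal_search_min_priority
  intro tokens operators levels _hdom hpre
  unfold Spec_search_min_priority
  unfold Pre_search_min_priority at hpre
  have hlen : (pvInflB tokens 0).length = tokens.length := pvInflB_length tokens 0
  have hne : pvInflB tokens 0 ≠ [] := by
    intro h
    apply hpre
    rw [h] at hlen
    exact List.length_eq_zero_iff.mp hlen.symm
  obtain ⟨m0, hmin⟩ : ∃ m0, PySem.List.min? (pvInflB tokens 0) (fun x => x) = some m0 := by
    cases h : PySem.List.min? (pvInflB tokens 0) (fun x => x) with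
    | none => exact absurd ((PySem.List.min?_eq_none_iff _ _).mp h) hne
    | some m => exact ⟨m, rfl⟩
  simp only [search_min_priority, search_min_priority_alt, pvDetermine_eq tokens m0 hmin, hmin]
  set m : Int := if 0 < m0 then m0 else 0 with hm
  have hm0 : 0 ≤ m := by rw [hm]; split_ifs <;> omega
  rw [pvToksB_eq tokens m hm0]
  set T : List String := (tokens.drop m.toNat).take (tokens.length - 2 * m.toNat) with hT
  have hTlen : T.length ≤ tokens.length := by
    rw [hT]
    simp only [List.length_take, List.length_drop]
    omega
  have hgood : T.foldl (fun g t => if t ∈ operators then true else g) false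
      = T.any (fun t => (PySem.Set.ofList operators).contains t) := by
    simpa using pvGoodFold T operators false
  rw [hgood]
  by_cases hg : T.any (fun t => (PySem.Set.ofList operators).contains t) = false
  · rw [if_pos hg, if_pos hg]
  · rw [if_neg hg, if_neg hg]
    have hlen' : T.length ≤ ((pvInflB tokens 0).map (fun v => v - m)).length := by
      rw [List.length_map, hlen]
      exact hTlen
    rw [pvForLevelsA_eq levels T _ _ hlen']
    rw [pvSearchLs_congr _ _ _ _ _
      (pvCondBridge (pvInflB tokens 0) m m0 T.length (by rw [hlen]; exact hTlen))]
    rw [pvBestB_eq levels T (pvInflB tokens 0) m0]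
    have hmain := pvMain levels (fun j => decide ((pvInflB tokens 0).getD j 0 = m0)) T
      (pvDescend T.length) none
    rw [show pvArmA levels (fun j => decide ((pvInflB tokens 0).getD j 0 = m0)) T none
        (pvDescend T.length)
        = pvSearchLs levels (fun j => decide ((pvInflB tokens 0).getD j 0 = m0)) T
            (pvDescend T.length) from rfl] at hmain
    rw [← hmain]
    cases pvBestF levels (fun j => decide ((pvInflB tokens 0).getD j 0 = m0)) T
        (pvDescend T.length) none with
    | none => rfl
    | some b => rfl
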